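-- pv_equiv track=rewrite | github.com/hms2186/Password_Strength_Analyser | wordlist_generator.py | leet_variants
-- ===== SOURCE A (Python) =====
-- from itertools import product, permutations
--
-- LEET_MAP = {
--     'a': ['a', '@', '4'],
--     'b': ['b', '8'],
--     'e': ['e', '3'],
--     'i': ['i', '1', '!'],
--     'l': ['l', '1', '|'],
--     'o': ['o', '0'],
--     's': ['s', '$', '5'],
--     't': ['t', '7'],
--     'g': ['g', '9'],
--     'z': ['z', '2']
-- }
--
-- def leet_variants(token: str, max_variants=50):
--     """
--     Produce leetspeak variants by substituting characters using LEET_MAP.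
--     Limit total variants to avoid explosion.
--     """
--     token = token.lower()
--     positions = [LEET_MAP.get(ch, [ch]) for ch in token]
--     # Compute cartesian product but limit
--     variants = []
--     for combo in product(*positions):
--         ent = ''.join(combo)
--         variants.append(ent)
--         if len(variants) >= max_variants:
--             break
--     return variants
-- ===== SOURCE B (Python) =====
-- LEET_MAP = {
--     'a': ['a', '@', '4'],
--     'b': ['b', '8'],
--     'e': ['e', '3'],
--     'i': ['i', '1', '!'],
--     'l': ['l', '1', '|'],
--     'o': ['o', '0'],
--     's': ['s', '$', '5'],
--     't': ['t', '7'],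
--     'g': ['g', '9'],
--     'z': ['z', '2']
-- }
--
-- def leet_variants(token: str, max_variants=50):
--     """
--     Iterative depth-first search with an explicit stack of (position, prefix)
--     frames: grow a prefix one character at a time, collect each finished
--     string, and stop as soon as enough variants have been gathered.
--     """
--     options = [LEET_MAP.get(ch, [ch]) for ch in token.lower()]
--     results = []
--     stack = [(0, '')]
--     while stack:
--         i, prefix = stack.pop()
--         if i == len(options):
--             results.append(prefix)
--             if len(results) >= max_variants:
--                 break
--         else:
--             for ch in reversed(options[i]):
--                 stack.append((i + 1, prefix + ch))
--     return results
-- ===== Notes on version B (the rewrite author's own statement) =====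
-- stated objective: alternative
-- what changed: Replaces the itertools.product stream with an iterative depth-first search over the token's positions using an explicit stack of (position, prefix) frames, growing a prefix one character at a time and breaking out once enough variants are collected.
import Mathlib
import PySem

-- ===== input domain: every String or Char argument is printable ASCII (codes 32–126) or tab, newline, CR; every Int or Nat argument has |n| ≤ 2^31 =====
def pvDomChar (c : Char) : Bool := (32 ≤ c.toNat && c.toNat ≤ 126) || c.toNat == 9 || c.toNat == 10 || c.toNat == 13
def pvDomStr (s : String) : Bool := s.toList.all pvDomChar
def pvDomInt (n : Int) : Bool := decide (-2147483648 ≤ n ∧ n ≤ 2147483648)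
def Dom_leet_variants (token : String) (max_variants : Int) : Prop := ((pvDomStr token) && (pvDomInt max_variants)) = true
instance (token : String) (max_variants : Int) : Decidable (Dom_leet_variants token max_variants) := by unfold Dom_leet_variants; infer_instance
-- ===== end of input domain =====

-- B replaces the itertools.product stream by an explicit-stack depth-first search over the
-- token's positions carrying growing prefixes; alternative decomposition, same cost.

-- shared module constant: LEET_MAP.get(ch, [ch]) (all options are single characters, so an option is a Char)
def pvLeet (c : Char) : List Char :=
  if c = 'a' then ['a', '@', '4']
  else if c = 'b' then ['b', '8']
  else if c = 'e' then ['e', '3']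
  else if c = 'i' then ['i', '1', '!']
  else if c = 'l' then ['l', '1', '|']
  else if c = 'o' then ['o', '0']
  else if c = 's' then ['s', '$', '5']
  else if c = 't' then ['t', '7']
  else if c = 'g' then ['g', '9']
  else if c = 'z' then ['z', '2']
  else [c]

-- ===== PORT A =====
-- itertools.product(*positions): leftmost position varies slowest
def pvProduct : List (List Char) → List (List Char)
  | [] => [[]]
  | p :: ps => p.flatMap (fun x => (pvProduct ps).map (fun c => x :: c))

-- the 'for combo in product(...): append ''.join(combo); if len(variants) >= max_variants: break' loop
def leetLoopA (mx : Int) : List (List Char) → List String → List String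
  | [], vs => vs
  | c :: rest, vs =>
      let v := vs ++ [String.ofList c]
      if mx ≤ (v.length : Int) then v else leetLoopA mx rest v

def leet_variants (token : String) (max_variants : Int) : List String :=
  let positions := (PySem.Str.lower token).toList.map pvLeet
  leetLoopA max_variants (pvProduct positions) []

-- ===== PORT B =====
-- termination measure of a stack frame: the number of nodes of the search tree below it
def pvSize : List (List Char) → Nat
  | [] => 1
  | o :: rest => 1 + o.length * pvSize rest

-- the 'while stack:' loop.  A frame (i, prefix) is carried as (options[i:], prefix); the head of
-- the Lean list is the top of the stack (the end of the Python list), so Python's pushes of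
-- reversed(options[i]) leave the frames of options[i] on the stack in their original order,
-- i.e. 'opts.map … ++ stack' with the frame of the first option on top.
def pvStackLoop (mx : Int) : List (List (List Char) × String) → List String → List String
  | [], res => res
  | (P, pre) :: stack, res =>
      match P with
      | [] =>
          let r := res ++ [pre]
          if mx ≤ (r.length : Int) then r else pvStackLoop mx stack r
      | opts :: rest =>
          pvStackLoop mx (opts.map (fun c => (rest, pre.push c)) ++ stack) res
termination_by st _ => (st.map (fun e => pvSize e.1)).sum
decreasing_by
  · simp [pvSize]
  · simp only [List.map_append, List.sum_append, List.map_map, Function.comp_def,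
      List.map_cons, List.sum_cons, pvSize]
    simp only [List.map_const', List.length_attach, List.sum_replicate, smul_eq_mul]
    omega

def leet_variants_alt (token : String) (max_variants : Int) : List String :=
  let options := (PySem.Str.lower token).toList.map pvLeet
  pvStackLoop max_variants [(options, "")] []

-- ===== PRECONDITION & SPEC =====
def Spec_leet_variants (token : String) (max_variants : Int) (out : List String) : Prop := out = leet_variants_alt token max_variants
instance (token : String) (max_variants : Int) (out : List String) : Decidable (Spec_leet_variants token max_variants out) := by unfold Spec_leet_variants; infer_instance

-- ===== CLAIM (what is proved, stated in full; the proofs are below) =====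
def Claim_equal_leet_variants : Prop := ∀ (token : String) (max_variants : Int), Dom_leet_variants token max_variants → Spec_leet_variants token max_variants (leet_variants token max_variants)

-- ===== LEMMAS AND PROOFS =====

-- the effective cutoff: both programs stop as soon as len(results) ≥ max_variants, checked
-- after each append, so at least one variant is always produced
def pvK (mx : Int) : Nat := (if 1 < mx then mx else 1).toNat

theorem pvK_pos (mx : Int) : 0 < pvK mx := by
  unfold pvK; split_ifs <;> omega

-- A's loop returns the first pvK joined combos (appended after vs)
theorem leetLoopA_take (mx : Int) (combos : List (List Char)) (vs : List String)
    (h : vs.length < pvK mx) :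
    leetLoopA mx combos vs
      = vs ++ (combos.map String.ofList).take (pvK mx - vs.length) := by
  induction combos generalizing vs with
  | nil => simp [leetLoopA]
  | cons c rest ih =>
      simp only [leetLoopA, List.length_append, List.length_cons, List.length_nil]
      by_cases hb : mx ≤ ((vs.length + 1 : Nat) : Int)
      · rw [if_pos (by simpa using hb)]
        have hK : pvK mx - vs.length = 1 := by
          unfold pvK at *; split_ifs at * <;> omega
        simp [hK]
      · rw [if_neg (by simpa using hb)]
        have h' : (vs ++ [String.ofList c]).length < pvK mx := by
          simp only [List.length_append, List.length_cons, List.length_nil]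
          unfold pvK at *; split_ifs at * <;> omega
        rw [ih _ h']
        have hK : pvK mx - vs.length
            = ((pvK mx - (vs.length + 1)) + 1) := by
          unfold pvK at *; split_ifs at * <;> omega
        simp [hK, List.take_succ_cons]

theorem push_append_ofList (pre : String) (x : Char) (l : List Char) :
    pre ++ String.ofList (x :: l) = (pre.push x) ++ String.ofList l := by
  have h : (pre ++ String.ofList (x :: l)).toList = ((pre.push x) ++ String.ofList l).toList := by
    simp
  exact String.toList_injective h

-- the strings a stack produces when run to exhaustion, in pop order
def pvYield (stack : List (List (List Char) × String)) : List String :=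
  stack.flatMap (fun e => (pvProduct e.1).map (fun c => e.2 ++ String.ofList c))

-- the DFS invariant: starting below the cutoff, the loop appends the stack's yield,
-- truncated at the cutoff
theorem pvStackLoop_spec (mx : Int) :
    ∀ (stack : List (List (List Char) × String)) (res : List String),
    res.length < pvK mx →
    pvStackLoop mx stack res = res ++ (pvYield stack).take (pvK mx - res.length) := by
  intro stack res
  induction stack, res using pvStackLoop.induct mx with
  | case1 res =>
      intro hres
      simp [pvStackLoop, pvYield]
  | case2 pre stack res r hstop =>
      intro hres
      rw [pvStackLoop, if_pos hstop]
      have hstop' : mx ≤ ((res.length + 1 : Nat) : Int) := by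
        simpa [r] using hstop
      have h1 : pvK mx - res.length = 1 := by
        unfold pvK at *; split_ifs at * <;> omega
      rw [h1]
      have hofl : pre ++ String.ofList [] = pre := by
        rw [show String.ofList ([] : List Char) = "" from rfl, String.append_empty]
      simp [pvYield, pvProduct, hofl]
  | case3 pre stack res r hstop ih =>
      intro hres
      rw [pvStackLoop, if_neg hstop]
      have hstop' : ¬ mx ≤ ((res.length + 1 : Nat) : Int) := by
        simpa [r] using hstop
      have hr : r.length < pvK mx := by
        simp only [r, List.length_append, List.length_cons, List.length_nil]
        unfold pvK at *; split_ifs at * <;> omega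
      rw [ih hr]
      have hofl : pre ++ String.ofList [] = pre := by
        rw [show String.ofList ([] : List Char) = "" from rfl, String.append_empty]
      have hK : pvK mx - res.length = (pvK mx - (res.length + 1)) + 1 := by
        unfold pvK at *; split_ifs at * <;> omega
      simp only [pvYield, List.flatMap_cons, pvProduct, List.map_cons, List.map_nil, hofl,
        r, List.length_append, List.length_cons, List.length_nil]
      rw [hK, List.singleton_append, List.take_succ_cons]
      simp
  | case4 pre stack res opts rest ih =>
      intro hres
      rw [pvStackLoop]
      have hattach : List.map (fun x : {x // x ∈ opts} =>
            match x with | ⟨c, _⟩ => (rest, pre.push c)) opts.attach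
          = opts.map (fun c => (rest, pre.push c)) := by simp
      rw [hattach] at ih
      rw [ih hres]
      have hprod : pvYield ((opts :: rest, pre) :: stack)
          = pvYield (opts.map (fun c => (rest, pre.push c)) ++ stack) := by
        simp only [pvYield, List.flatMap_cons, List.flatMap_append, List.flatMap_map]
        rw [show pvProduct (opts :: rest)
              = opts.flatMap (fun x => (pvProduct rest).map (fun c => x :: c)) from rfl]
        rw [List.map_flatMap]
        refine congrArg (· ++ _) ?_
        refine List.flatMap_congr ?_
        intro x _
        rw [List.map_map]
        refine List.map_congr_left ?_
        intro c _
        exact push_append_ofList pre x c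
      rw [hprod]

-- ===== VERDICT (by name: the statement is the Claim_ definition above) =====
theorem leet_variants_spec : Claim_equal_leet_variants := by
  intro token mx _
  unfold Spec_leet_variants leet_variants leet_variants_alt
  dsimp only
  set P : List (List Char) := (PySem.Str.lower token).toList.map pvLeet with hP
  rw [leetLoopA_take mx (pvProduct P) [] (by simpa using pvK_pos mx)]
  rw [pvStackLoop_spec mx [(P, "")] [] (by simpa using pvK_pos mx)]
  simp only [pvYield, List.flatMap_cons, List.flatMap_nil, List.append_nil,
    List.length_nil, Nat.sub_zero, List.nil_append]
  congr 1
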